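-- pv_equiv track=rewrite | github.com/FronTexas/Fron-Algo-practice | 2017_12_28_find_substrings.py | findSubstrings
-- ===== SOURCE A (Python) =====
-- class KMP:
-- 	def partial(self, pattern):
-- 		""" Calculate partial match table: String -> [Int]"""
-- 		ret = [0]
--
-- 		for i in range(1, len(pattern)):
-- 			j = ret[i - 1]
-- 			while j > 0 and pattern[j] != pattern[i]:
-- 				j = ret[j - 1]
-- 			ret.append(j + 1 if pattern[j] == pattern[i] else j)
-- 		return ret
--
-- 	def has_match(self, T, P):
-- 		partial, ret, j = self.partial(P), [], 0
--
-- 		for i in range(len(T)):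
-- 			while j > 0 and T[i] != P[j]:
-- 				j = partial[j - 1]
-- 			if T[i] == P[j]: j += 1
-- 			if j == len(P):
-- 				return (True, i - (j - 1))
-- 				j = 0
-- 		return (False, -2)
--
-- def insert_at(i, w, c):
-- 	return w[:i] + c + w[i:]
--
-- def findSubstrings(words, parts):
-- 	kmp = KMP()
-- 	answer = []
--
-- 	for word in words:
-- 		longest_match_so_far = ''
-- 		index_of_longest_match_so_far = len(parts)
-- 		for part in parts:
-- 			has_match, index_of_match = kmp.has_match(word, part)
-- 			if has_match:
-- 				if len(part) == len(longest_match_so_far) and index_of_match < index_of_longest_match_so_far: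
-- 					longest_match_so_far = part
-- 					index_of_longest_match_so_far = index_of_match
-- 				elif len(part) > len(longest_match_so_far):
-- 					longest_match_so_far = part
-- 					index_of_longest_match_so_far = index_of_match
-- 		if len(longest_match_so_far) > 0:
-- 			modified_word = word
-- 			modified_word = insert_at(index_of_longest_match_so_far, modified_word, "[")
-- 			modified_word = insert_at(index_of_longest_match_so_far + len(longest_match_so_far) + 1, modified_word, "]")
-- 			answer.append(modified_word)
-- 		else:
-- 			answer.append(word)
-- 	return answer
-- ===== SOURCE B (Python) =====
-- def findSubstrings(words, parts):
--     answer = []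
--     for word in words:
--         matches = [(len(p), -word.find(p)) for p in parts if p and p in word]
--         if matches:
--             length, neg_i = max(matches)
--             i = -neg_i
--             word = word[:i] + '[' + word[i:i + length] + ']' + word[i + length:]
--         answer.append(word)
--     return answer
-- ===== Notes on version B (the rewrite author's own statement) =====
-- stated objective: faster
-- what changed: Replaces the hand-rolled KMP matcher and the manual running-best bookkeeping with the built-in substring search (p in word / word.find) and a single max() over (length, -index) tuples per word.
import Mathlib
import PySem

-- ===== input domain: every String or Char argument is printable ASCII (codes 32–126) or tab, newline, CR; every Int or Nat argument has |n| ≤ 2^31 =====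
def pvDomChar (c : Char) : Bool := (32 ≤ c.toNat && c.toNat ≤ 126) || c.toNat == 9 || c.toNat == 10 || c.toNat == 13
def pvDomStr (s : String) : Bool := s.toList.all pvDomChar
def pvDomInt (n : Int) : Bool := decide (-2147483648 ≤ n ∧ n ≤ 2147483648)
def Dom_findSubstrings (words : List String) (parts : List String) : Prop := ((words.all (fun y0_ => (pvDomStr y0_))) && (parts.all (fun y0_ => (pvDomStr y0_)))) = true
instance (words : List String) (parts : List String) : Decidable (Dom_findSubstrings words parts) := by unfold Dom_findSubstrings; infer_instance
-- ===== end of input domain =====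

-- B replaces A's hand-rolled per-part KMP matcher and manual running-best bookkeeping with the
-- built-in substring search (p in word / word.find) and one max() over (length, -index) tuples per word.



-- ===== PORT A =====
-- shared while-loop shape: `while j > 0 and c != p[j]: j = tab[j-1]` (fuel = j suffices: tab entries < their index+1)
def kmpWhile (p : List Char) (tab : List Nat) (c : Char) : Nat → Nat → Nat
  | 0, j => j
  | fuel+1, j => if 0 < j ∧ ¬ c = p.getD j '?' then kmpWhile p tab c fuel (tab.getD (j-1) 0) else j

-- one iteration of the `partial` loop (i = current index, 1 ≤ i)
def kmpStep (p : List Char) (tab : List Nat) (i : Nat) : List Nat :=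
  let j := tab.getD (i-1) 0
  let r := kmpWhile p tab (p.getD i '?') j j
  tab ++ [if p.getD i '?' = p.getD r '?' then r + 1 else r]

-- table after n iterations of the `partial` loop (Python runs n = len(p) - 1 of them)
def kmpTab (p : List Char) : Nat → List Nat
  | 0 => [0]
  | n+1 => kmpStep p (kmpTab p n) (n+1)

-- the `for i in range(len(T))` loop of has_match
def matchLoop (p T : List Char) (tab : List Nat) (i j : Nat) : Bool × Int :=
  if _h : i < T.length then
    let j1 := kmpWhile p tab (T.getD i '?') j j
    let j2 := if T.getD i '?' = p.getD j1 '?' then j1 + 1 else j1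
    if j2 = p.length then (true, (i : Int) - ((j2 : Int) - 1))
    else matchLoop p T tab (i+1) j2
  else (false, -2)
termination_by T.length - i

def hasMatch (T p : List Char) : Bool × Int :=
  matchLoop p T (kmpTab p (p.length - 1)) 0 0

def insertAt (i : Int) (w c : List Char) : List Char :=
  PySem.List.slice w none (some i) ++ c ++ PySem.List.slice w (some i) none

def findSubstrings (words : List String) (parts : List String) : List String :=
  words.foldl (fun answer word =>
    let st := parts.foldl (fun (st : List Char × Int) part =>
      let hm := hasMatch word.toList part.toList
      if hm.1 then
        if part.toList.length = st.1.length ∧ hm.2 < st.2 then (part.toList, hm.2)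
        else if st.1.length < part.toList.length then (part.toList, hm.2)
        else st
      else st) (([] : List Char), (parts.length : Int))
    if 0 < st.1.length then
      answer ++ [String.ofList (insertAt (st.2 + (st.1.length : Int) + 1) (insertAt st.2 word.toList ['[']) [']'])]
    else answer ++ [word]) []

-- ===== PORT B =====
def findSubstrings_alt (words : List String) (parts : List String) : List String :=
  words.foldl (fun answer word =>
    let w := word.toList
    let ms := (parts.filter (fun p => !(p == "") && PySem.Chars.isIn p.toList w)).map
        (fun p => ((p.toList.length : Int), - PySem.Chars.find w p.toList))
    match PySem.List.max2? ms (·.1) (·.2) with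
    | some (L, ni) =>
      answer ++ [String.ofList (PySem.List.slice w none (some (-ni)) ++ '[' ::
        (PySem.List.slice w (some (-ni)) (some (-ni + L)) ++ ']' ::
          PySem.List.slice w (some (-ni + L)) none))]
    | none => answer ++ [word]) []



-- ===== PRECONDITION & SPEC =====
-- Pre_ excludes exactly the inputs on which A raises IndexError: parts containing the empty
-- string together with at least one non-empty word (has_match evaluates pattern[0] on the
-- empty pattern there).
def Pre_findSubstrings (words : List String) (parts : List String) : Prop :=
  "" ∈ parts → ∀ w ∈ words, w = ""
instance (words : List String) (parts : List String) : Decidable (Pre_findSubstrings words parts) := by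
  unfold Pre_findSubstrings; infer_instance

def pvWitness_findSubstrings : List String × List String := (["abcab", "xy"], ["ab", "bc"])

def Spec_findSubstrings (words : List String) (parts : List String) (out : List String) : Prop :=
  out = findSubstrings_alt words parts
instance (words : List String) (parts : List String) (out : List String) :
    Decidable (Spec_findSubstrings words parts out) := by
  unfold Spec_findSubstrings; infer_instance

-- ===== CLAIM (what is proved, stated in full; the proofs are below) =====
def Claim_equal_findSubstrings : Prop := ∀ (words : List String) (parts : List String),
  Dom_findSubstrings words parts → Pre_findSubstrings words parts →
  Spec_findSubstrings words parts (findSubstrings words parts)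

-- ===== LEMMAS AND PROOFS =====
-- ================= helper defs =================
def phi (p : List Char) (k : Nat) : Nat :=
  Nat.findGreatest (fun j => j < k ∧ p.take j <:+ p.take k) k

def psi (p T : List Char) (i : Nat) : Nat :=
  Nat.findGreatest (fun j => j ≤ i ∧ p.take j <:+ T.take i) p.length

def TabOK (p : List Char) (tab : List Nat) (m : Nat) : Prop :=
  ∀ t, t < m → tab.getD t 0 = phi p (t+1)

-- ================= suffix algebra =================
theorem suffix_snoc_iff (a b : List Char) (x y : Char) :
    a ++ [x] <:+ b ++ [y] ↔ x = y ∧ a <:+ b := by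
  rw [← List.reverse_prefix]
  simp only [List.reverse_append, List.reverse_cons, List.reverse_nil, List.nil_append,
    List.cons_append, List.cons_prefix_cons, List.reverse_prefix]

theorem take_snoc (l : List Char) (n : Nat) (h : n < l.length) :
    l.take (n+1) = l.take n ++ [l[n]] := by
  rw [List.take_add_one, List.getElem?_eq_getElem h]; rfl

-- take (x+1) <:+ take (k+1) unfolding (both x,k < length)
theorem take_succ_suffix_iff (p q : List Char) (x k : Nat) (hx : x < p.length) (hk : k < q.length) :
    p.take (x+1) <:+ q.take (k+1) ↔ p[x] = q[k] ∧ p.take x <:+ q.take k := by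
  rw [take_snoc p x hx, take_snoc q k hk, suffix_snoc_iff]

-- ================= phi =================
theorem phi_lt (p : List Char) (k : Nat) (hk : 0 < k) : phi p k < k := by
  unfold phi
  rcases Nat.eq_zero_or_pos (Nat.findGreatest (fun j => j < k ∧ p.take j <:+ p.take k) k) with h | h
  · omega
  · exact (Nat.findGreatest_spec (P := fun j => j < k ∧ p.take j <:+ p.take k) (m := 0) (Nat.zero_le _) ⟨hk, List.nil_suffix⟩).1

theorem phi_suffix (p : List Char) (k : Nat) (hk : 0 < k) :
    p.take (phi p k) <:+ p.take k := by
  unfold phi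
  rcases Nat.eq_zero_or_pos (Nat.findGreatest (fun j => j < k ∧ p.take j <:+ p.take k) k) with h | h
  · simp [h]
  · exact (Nat.findGreatest_spec (P := fun j => j < k ∧ p.take j <:+ p.take k) (m := 0) (Nat.zero_le _) ⟨hk, List.nil_suffix⟩).2

theorem phi_max (p : List Char) (k x : Nat) (hx : x < k) (hs : p.take x <:+ p.take k) :
    x ≤ phi p k :=
  Nat.le_findGreatest (Nat.le_of_lt hx) ⟨hx, hs⟩

theorem chain_step (p : List Char) (j x : Nat) (hj : j ≤ p.length) (hx : x < j)
    (hs : p.take x <:+ p.take j) : x ≤ phi p j ∧ p.take x <:+ p.take (phi p j) := by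
  have h1 : x ≤ phi p j := phi_max p j x hx hs
  refine ⟨h1, ?_⟩
  have h2 : p.take (phi p j) <:+ p.take j := phi_suffix p j (by omega)
  have hlx : (p.take x).length = x := by simp; omega
  have hlphi : (p.take (phi p j)).length = phi p j := by
    have := phi_lt p j (by omega); simp; omega
  exact List.suffix_of_suffix_length_le hs h2 (by omega)

-- ================= the while loop =================
theorem kmpWhile_spec (p : List Char) (tab : List Nat) (c : Char) (fuel : Nat) :
    ∀ j, j ≤ fuel → j < p.length → TabOK p tab j →
    kmpWhile p tab c fuel j ≤ j ∧
    p.take (kmpWhile p tab c fuel j) <:+ p.take j ∧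
    (kmpWhile p tab c fuel j = 0 ∨ c = p.getD (kmpWhile p tab c fuel j) '?') ∧
    (∀ x, x ≤ j → p.take x <:+ p.take j → (x = 0 ∨ c = p.getD x '?') →
      x ≤ kmpWhile p tab c fuel j) := by
  induction fuel with
  | zero =>
    intro j hfj hjp htab
    interval_cases j
    simp [kmpWhile]
  | succ fuel ih =>
    intro j hfj hjp htab
    rw [kmpWhile]
    by_cases hc : 0 < j ∧ ¬ c = p.getD j '?'
    · rw [if_pos hc]
      have htabj : tab.getD (j-1) 0 = phi p j := by
        have := htab (j-1) (by omega); rwa [Nat.sub_add_cancel (by omega)] at this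
      rw [htabj]
      have hphi_lt : phi p j < j := phi_lt p j hc.1
      have h1 := ih (phi p j) (by omega) (by omega)
        (fun t ht => htab t (by omega))
      obtain ⟨hle, hsuf, hexit, hmax⟩ := h1
      have hsufj : p.take (phi p j) <:+ p.take j := phi_suffix p j hc.1
      refine ⟨by omega, hsuf.trans hsufj, hexit, ?_⟩
      intro x hx hxs hxe
      rcases Nat.lt_or_ge x j with hxlt | hxge
      · obtain ⟨hx1, hx2⟩ := chain_step p j x (by omega) hxlt hxs
        exact hmax x hx1 hx2 hxe
      · -- x = j : contradicts the loop guard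
        have : x = j := by omega
        subst this
        rcases hxe with h0 | hpe
        · omega
        · exact absurd hpe hc.2
    · rw [if_neg hc]
      refine ⟨le_refl j, List.suffix_refl _, ?_, fun x hx _ _ => hx⟩
      by_cases h0 : j = 0
      · exact Or.inl h0
      · exact Or.inr (by push Not at hc; exact hc (by omega))

theorem getD_eq (p : List Char) (x : Nat) (h : x < p.length) : p.getD x '?' = p[x] :=
  List.getD_eq_getElem p '?' h

theorem entry_eq_phi (p : List Char) (tab : List Nat) (k : Nat) (hk : 0 < k) (hkp : k < p.length)
    (htab : TabOK p tab k) :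
    (if p.getD k '?' = p.getD (kmpWhile p tab (p.getD k '?') (phi p k) (phi p k)) '?'
     then kmpWhile p tab (p.getD k '?') (phi p k) (phi p k) + 1
     else kmpWhile p tab (p.getD k '?') (phi p k) (phi p k)) = phi p (k+1) := by
  have hj0lt : phi p k < k := phi_lt p k hk
  obtain ⟨hrle, hrsuf, hrexit, hrmax⟩ :=
    kmpWhile_spec p tab (p.getD k '?') (phi p k) (phi p k) (le_refl _) (by omega)
      (fun t ht => htab t (by omega))
  set c := p.getD k '?' with hc
  set j0 := phi p k with hj0
  set r := kmpWhile p tab c j0 j0 with hr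
  have hrk : r < k := by omega
  have hsufk : p.take j0 <:+ p.take k := phi_suffix p k hk
  have upper : phi p (k+1) ≤ (if c = p.getD r '?' then r + 1 else r) := by
    have hylt : phi p (k+1) < k + 1 := phi_lt p (k+1) (by omega)
    have hysuf : p.take (phi p (k+1)) <:+ p.take (k+1) := phi_suffix p (k+1) (by omega)
    rcases Nat.eq_zero_or_pos (phi p (k+1)) with h0 | hpos
    · split <;> omega
    · obtain ⟨x, hx⟩ : ∃ x, phi p (k+1) = x + 1 := ⟨phi p (k+1) - 1, by omega⟩
      rw [hx] at hysuf hylt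
      rw [hx]
      rw [take_succ_suffix_iff p p x k (by omega) hkp] at hysuf
      obtain ⟨hpx, hxsuf⟩ := hysuf
      obtain ⟨hx1, hx2⟩ := chain_step p k x (by omega) (by omega) hxsuf
      have hxr : x ≤ r := hrmax x hx1 hx2
        (Or.inr (by rw [hc, getD_eq p x (by omega), getD_eq p k hkp, hpx]))
      by_cases hb : c = p.getD r '?'
      · rw [if_pos hb]; omega
      · rw [if_neg hb]
        rcases hrexit with h0' | h' ; swap
        · exact absurd h' hb
        · exfalso
          apply hb
          have hx0 : x = 0 := by omega
          rw [h0', ← hx0, hc, getD_eq p x (by omega), getD_eq p k hkp, hpx]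
  have lower : (if c = p.getD r '?' then r + 1 else r) ≤ phi p (k+1) := by
    by_cases hb : c = p.getD r '?'
    · rw [if_pos hb]
      apply Nat.le_findGreatest (by omega)
      refine ⟨by omega, ?_⟩
      rw [take_succ_suffix_iff p p r k (by omega) hkp]
      constructor
      · rw [← getD_eq p r (by omega), ← getD_eq p k hkp, ← hb]
      · exact hrsuf.trans hsufk
    · rw [if_neg hb]
      rcases hrexit with h0 | h'
      · omega
      · exact absurd h' hb
  omega

theorem kmpTab_spec (p : List Char) : ∀ n, n < p.length →
    (kmpTab p n).length = n + 1 ∧ TabOK p (kmpTab p n) (n+1) := by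
  intro n
  induction n with
  | zero =>
    intro _
    refine ⟨rfl, ?_⟩
    intro t ht
    interval_cases t
    have := phi_lt p 1 (by omega)
    simp [kmpTab]
    omega
  | succ n ih =>
    intro hlt
    obtain ⟨hlen, htab⟩ := ih (by omega)
    have hgetn : (kmpTab p n).getD n 0 = phi p (n+1) := htab n (by omega)
    rw [kmpTab]
    simp only [kmpStep, Nat.add_sub_cancel, hgetn]
    constructor
    · simp [hlen]
    · intro t ht
      rcases Nat.lt_or_ge t (n+1) with h | h
      · rw [List.getD_append _ _ _ _ (by omega)]
        exact htab t h
      · have ht2 : t = n + 1 := by omega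
        subst ht2
        rw [List.getD_eq_getElem _ _ (by simp [hlen]), List.getElem_append_right (by omega)]
        simp only [hlen, Nat.sub_self, List.getElem_singleton]
        exact entry_eq_phi p (kmpTab p n) (n+1) (by omega) hlt htab

theorem psi_le_len (p T : List Char) (i : Nat) : psi p T i ≤ p.length :=
  Nat.findGreatest_le _

theorem psi_spec (p T : List Char) (i : Nat) :
    psi p T i ≤ i ∧ p.take (psi p T i) <:+ T.take i := by
  unfold psi
  rcases Nat.eq_zero_or_pos (Nat.findGreatest (fun j => j ≤ i ∧ p.take j <:+ T.take i) p.length) with h | h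
  · rw [h]; exact ⟨Nat.zero_le _, by simp [List.nil_suffix]⟩
  · exact Nat.findGreatest_spec (P := fun j => j ≤ i ∧ p.take j <:+ T.take i) (m := 0)
      (Nat.zero_le _) ⟨Nat.zero_le _, by simp [List.nil_suffix]⟩

theorem psi_max (p T : List Char) (i x : Nat) (hxl : x ≤ p.length) (hxi : x ≤ i)
    (hs : p.take x <:+ T.take i) : x ≤ psi p T i :=
  Nat.le_findGreatest hxl ⟨hxi, hs⟩

theorem psi_zero (p T : List Char) : psi p T 0 = 0 :=
  Nat.le_zero.mp (psi_spec p T 0).1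

theorem psi_step (p T : List Char) (tab : List Nat) (i : Nat) (hi : i < T.length)
    (hlt : psi p T i < p.length) (htab : TabOK p tab p.length) :
    (if T.getD i '?' = p.getD (kmpWhile p tab (T.getD i '?') (psi p T i) (psi p T i)) '?'
     then kmpWhile p tab (T.getD i '?') (psi p T i) (psi p T i) + 1
     else kmpWhile p tab (T.getD i '?') (psi p T i) (psi p T i)) = psi p T (i+1) := by
  obtain ⟨hji, hjsuf⟩ := psi_spec p T i
  obtain ⟨hrle, hrsuf, hrexit, hrmax⟩ :=
    kmpWhile_spec p tab (T.getD i '?') (psi p T i) (psi p T i) (le_refl _) hlt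
      (fun t ht => htab t (by omega))
  set c := T.getD i '?' with hc
  set j0 := psi p T i with hj0
  set r := kmpWhile p tab c j0 j0 with hr
  have upper : psi p T (i+1) ≤ (if c = p.getD r '?' then r + 1 else r) := by
    have hyl : psi p T (i+1) ≤ p.length := psi_le_len p T (i+1)
    obtain ⟨hyi, hysuf⟩ := psi_spec p T (i+1)
    rcases Nat.eq_zero_or_pos (psi p T (i+1)) with h0 | hpos
    · split <;> omega
    · obtain ⟨x, hx⟩ : ∃ x, psi p T (i+1) = x + 1 := ⟨psi p T (i+1) - 1, by omega⟩
      rw [hx] at hysuf hyi hyl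
      rw [hx]
      rw [take_succ_suffix_iff p T x i (by omega) hi] at hysuf
      obtain ⟨hpx, hxsuf⟩ := hysuf
      have hxj : x ≤ j0 := psi_max p T i x (by omega) (by omega) hxsuf
      have hxsufj : p.take x <:+ p.take j0 := by
        refine List.suffix_of_suffix_length_le hxsuf hjsuf ?_
        have l1 : (p.take x).length = x := by simp; omega
        have l2 : (p.take j0).length = j0 := by simp; omega
        omega
      have hxr : x ≤ r := hrmax x hxj hxsufj
        (Or.inr (by rw [hc, getD_eq p x (by omega), getD_eq T i hi, hpx]))
      by_cases hb : c = p.getD r '?'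
      · rw [if_pos hb]; omega
      · rw [if_neg hb]
        rcases hrexit with h0' | h' ; swap
        · exact absurd h' hb
        · exfalso
          apply hb
          have hx0 : x = 0 := by omega
          rw [h0', ← hx0, hc, getD_eq p x (by omega), getD_eq T i hi, hpx]
  have lower : (if c = p.getD r '?' then r + 1 else r) ≤ psi p T (i+1) := by
    by_cases hb : c = p.getD r '?'
    · rw [if_pos hb]
      apply psi_max p T (i+1) (r+1) (by omega) (by omega)
      rw [take_succ_suffix_iff p T r i (by omega) hi]
      constructor
      · rw [← getD_eq p r (by omega), ← getD_eq T i hi, ← hb]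
      · exact hrsuf.trans hjsuf
    · rw [if_neg hb]
      rcases hrexit with h0 | h'
      · omega
      · exact absurd h' hb
  omega

theorem occ_of_psi_full (p T : List Char) (i : Nat) (hi : i ≤ T.length)
    (h : psi p T i = p.length) : p.length ≤ i ∧ p <+: T.drop (i - p.length) := by
  obtain ⟨hji, hjsuf⟩ := psi_spec p T i
  rw [h] at hji hjsuf
  rw [List.take_of_length_le (le_refl _)] at hjsuf
  obtain ⟨u, hu⟩ := hjsuf
  have hul : u.length = i - p.length := by
    have := congrArg List.length hu
    simp at this
    omega
  refine ⟨hji, ?_⟩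
  have hT : T = u ++ (p ++ T.drop i) := by
    conv_lhs => rw [← List.take_append_drop i T]
    rw [← hu, List.append_assoc]
  calc p <+: p ++ T.drop i := ⟨T.drop i, rfl⟩
    _ = (u ++ (p ++ T.drop i)).drop u.length := by rw [List.drop_left]
    _ = T.drop (i - p.length) := by rw [← hT, hul]

theorem psi_full_of_occ (p T : List Char) (s : Nat) (hocc : p <+: T.drop s) :
    psi p T (s + p.length) = p.length := by
  have h1 : psi p T (s + p.length) ≤ p.length := psi_le_len p T _
  have h2 : p.length ≤ psi p T (s + p.length) := by
    apply psi_max p T _ _ (le_refl _) (by omega)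
    rw [List.take_of_length_le (le_refl _)]
    have : T.take (s + p.length) = T.take s ++ p := by
      rw [List.take_add]
      congr 1
      exact (List.prefix_iff_eq_take.mp hocc).symm
    rw [this]
    exact ⟨T.take s, rfl⟩
  omega

theorem occ_le (p T : List Char) (s : Nat) (hp : p ≠ []) (hocc : p <+: T.drop s) :
    s + p.length ≤ T.length := by
  have := hocc.length_le
  simp at this
  rcases Nat.lt_or_ge s T.length with h | h
  · omega
  · exfalso
    have : p.length = 0 := by omega
    exact hp (List.eq_nil_of_length_eq_zero this)

theorem matchLoop_spec (p T : List Char) (tab : List Nat) (hp : p ≠ [])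
    (htab : TabOK p tab p.length) :
    ∀ i, i ≤ T.length → (∀ i', i' ≤ i → psi p T i' < p.length) →
    matchLoop p T tab i (psi p T i) =
      (if PySem.Chars.isIn p T then (true, PySem.Chars.find T p) else (false, -2)) := by
  intro i
  generalize hd : T.length - i = d
  induction d generalizing i with
  | zero =>
    intro hi hinv
    rw [matchLoop, dif_neg (by omega)]
    have hfalse : PySem.Chars.isIn p T = false := by
      rw [PySem.Chars.isIn_eq_false_iff]
      intro hinf
      have htrue : PySem.Chars.isIn p T = true := (PySem.Chars.isIn_iff_infix p T).mpr hinf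
      obtain ⟨s, hocc⟩ := (PySem.Chars.exists_prefix_drop_iff_isIn p T).mpr htrue
      have hle := occ_le p T s hp hocc
      have := psi_full_of_occ p T s hocc
      have := hinv (s + p.length) (by omega)
      omega
    rw [hfalse]
    rfl
  | succ d ih =>
    intro hi hinv
    have hiT : i < T.length := by omega
    rw [matchLoop, dif_pos hiT]
    simp only []
    rw [psi_step p T tab i hiT (hinv i (le_refl i)) htab]
    by_cases hfull : psi p T (i+1) = p.length
    · rw [if_pos hfull]
      -- an occurrence ends exactly at i+1 and none earlier
      obtain ⟨hlen, hocc⟩ := occ_of_psi_full p T (i+1) (by omega) hfull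
      set s := i + 1 - p.length with hs
      have hmin : ∀ s', s' < s → ¬ p <+: T.drop s' := by
        intro s' hs' hocc'
        have hle := occ_le p T s' hp hocc'
        have := psi_full_of_occ p T s' hocc'
        have := hinv (s' + p.length) (by omega)
        omega
      have htrue : PySem.Chars.isIn p T = true :=
        (PySem.Chars.exists_prefix_drop_iff_isIn p T).mp ⟨s, hocc⟩
      have hnn : 0 ≤ PySem.Chars.find T p := by
        rw [PySem.Chars.find_nonneg_iff]
        exact (PySem.Chars.isIn_iff_infix p T).mp htrue
      obtain ⟨hfocc, hfmin⟩ := PySem.Chars.find_spec hnn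
      have heq : (PySem.Chars.find T p).toNat = s := by
        rcases Nat.lt_trichotomy (PySem.Chars.find T p).toNat s with h | h | h
        · exact absurd hfocc (hmin _ h)
        · exact h
        · exact absurd hocc (hfmin s h)
      rw [htrue]
      simp only [if_true]
      have : PySem.Chars.find T p = (s : Int) := by
        rw [← heq, Int.toNat_of_nonneg hnn]
      rw [this]
      congr 1
      rw [hfull, hs]
      have hp1 : 1 ≤ p.length := by
        cases p with
        | nil => exact absurd rfl hp
        | cons a l => simp
      omega
    · rw [if_neg hfull]
      exact ih (i+1) (by omega) (by omega)
        (fun i' hi' => by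
          rcases Nat.lt_or_ge i' (i+1) with h | h
          · exact hinv i' (by omega)
          · have : i' = i + 1 := by omega
            rw [this]
            exact lt_of_le_of_ne (psi_le_len p T (i+1)) hfull)

theorem hasMatch_spec (T p : List Char) (hp : p ≠ []) :
    hasMatch T p = (if PySem.Chars.isIn p T then (true, PySem.Chars.find T p) else (false, -2)) := by
  have hp1 : 1 ≤ p.length := by
    cases p with
    | nil => exact absurd rfl hp
    | cons a l => simp
  obtain ⟨_, htab⟩ := kmpTab_spec p (p.length - 1) (by omega)
  have htab' : TabOK p (kmpTab p (p.length - 1)) p.length := by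
    have : p.length - 1 + 1 = p.length := by omega
    rwa [this] at htab
  have h := matchLoop_spec p T (kmpTab p (p.length - 1)) hp htab' 0 (Nat.zero_le _)
    (fun i' hi' => by
      have : i' = 0 := by omega
      rw [this, psi_zero]; omega)
  rw [psi_zero] at h
  exact h

theorem hasMatch_nil : hasMatch [] [] = (false, -2) := by
  unfold hasMatch
  rw [matchLoop, dif_neg (by simp)]

-- ================= selection layer =================
def selQ (w : List Char) (part : String) : Bool :=
  !(part == "") && PySem.Chars.isIn part.toList w

def fSel (w : List Char) (st : List Char × Int) (part : String) : List Char × Int :=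
  if part.toList.length = st.1.length ∧ PySem.Chars.find w part.toList < st.2 then
    (part.toList, PySem.Chars.find w part.toList)
  else if st.1.length < part.toList.length then
    (part.toList, PySem.Chars.find w part.toList)
  else st

def gMax (acc : Option (Int × Int)) (c : Int × Int) : Option (Int × Int) :=
  match acc with
  | none => some c
  | some m => if (decide (m.1 < c.1) || !decide (c.1 < m.1) && decide (m.2 < c.2)) = true then some c else some m

theorem gMax_none (c : Int × Int) : gMax none c = some c := rfl

theorem gMax_some (m c : Int × Int) :
    gMax (some m) c = if m.1 < c.1 ∨ (¬ c.1 < m.1 ∧ m.2 < c.2) then some c else some m := by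
  show (if (decide (m.1 < c.1) || !decide (c.1 < m.1) && decide (m.2 < c.2)) = true
        then some c else some m) = _
  by_cases h : m.1 < c.1 ∨ (¬ c.1 < m.1 ∧ m.2 < c.2)
  · rw [if_pos (by simpa using h), if_pos h]
  · rw [if_neg (by simpa using h), if_neg h]

def cand (w : List Char) (part : String) : Int × Int :=
  ((part.toList.length : Int), - PySem.Chars.find w part.toList)

def SelInv (w : List Char) (N : Int) (st : List Char × Int) (acc : Option (Int × Int)) : Prop :=
  (st = ([], N) ∧ acc = none) ∨
  (0 < st.1.length ∧ st.1 <:+: w ∧ st.2 = PySem.Chars.find w st.1 ∧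
    acc = some ((st.1.length : Int), -st.2))

theorem inv_step (w : List Char) (N : Int) (st : List Char × Int) (acc : Option (Int × Int))
    (q : String) (hq : selQ w q = true) (hinv : SelInv w N st acc) :
    SelInv w N (fSel w st q) (gMax acc (cand w q)) := by
  have hqne : q.toList ≠ [] := by
    simp only [selQ, Bool.and_eq_true, Bool.not_eq_true'] at hq
    intro h
    rw [String.toList_eq_nil_iff] at h
    simp [h] at hq
  have hqin : q.toList <:+: w := by
    simp only [selQ, Bool.and_eq_true] at hq
    exact (PySem.Chars.isIn_iff_infix _ _).mp hq.2
  have hqlen : 0 < q.toList.length := List.length_pos_iff.mpr hqne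
  rcases hinv with ⟨hst, hacc⟩ | ⟨hlen, hinf, hfind, hacc⟩
  · subst hst hacc
    rw [gMax_none]
    unfold fSel
    rw [if_neg (by intro hcon; have h : q.toList.length = 0 := hcon.1; omega),
        if_pos (show ([] : List Char).length < q.toList.length from hqlen)]
    exact Or.inr ⟨hqlen, hqin, rfl, rfl⟩
  · subst hacc
    rw [gMax_some]
    unfold fSel
    split_ifs with ha hb hc hd he
    · exact Or.inr ⟨hqlen, hqin, rfl, rfl⟩
    · exfalso
      apply hb
      right
      exact ⟨(by omega : ¬ ((q.toList.length : Int) < (st.1.length : Int))),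
             (by omega : -st.2 < -PySem.Chars.find w q.toList)⟩
    · exact Or.inr ⟨hqlen, hqin, rfl, rfl⟩
    · exact absurd (Or.inl (by omega : (st.1.length : Int) < (q.toList.length : Int))) hd
    · exfalso
      rcases he with hlt | ⟨hnl, hsnd⟩
      · have hlt' : (st.1.length : Int) < (q.toList.length : Int) := hlt
        omega
      · have hnl' : ¬ ((q.toList.length : Int) < (st.1.length : Int)) := hnl
        have hsnd' : -st.2 < -PySem.Chars.find w q.toList := hsnd
        push Not at ha
        have := ha (by omega)
        omega
    · exact Or.inr ⟨hlen, hinf, hfind, rfl⟩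

theorem inv_fold (w : List Char) (N : Int) (l : List String)
    (hl : ∀ q ∈ l, selQ w q = true) :
    ∀ st acc, SelInv w N st acc →
      SelInv w N (l.foldl (fSel w) st) (l.foldl (fun acc q => gMax acc (cand w q)) acc) := by
  induction l with
  | nil => intro st acc h; exact h
  | cons q l ih =>
    intro st acc h
    simp only [List.foldl_cons]
    exact ih (fun q' hq' => hl q' (List.mem_cons_of_mem _ hq'))
      _ _ (inv_step w N st acc q (hl q List.mem_cons_self) h)

theorem build_eq (w b : List Char) (i : Int) (h0 : 0 ≤ i) (hle : i.toNat + b.length ≤ w.length) :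
    insertAt (i + (b.length : Int) + 1) (insertAt i w ['[']) [']'] =
    PySem.List.slice w none (some i) ++ '[' ::
      (PySem.List.slice w (some i) (some (i + (b.length : Int))) ++ ']' ::
        PySem.List.slice w (some (i + (b.length : Int))) none) := by
  have h0' : (0 : Int) ≤ i + (b.length : Int) := by omega
  have h0'' : (0 : Int) ≤ i + (b.length : Int) + 1 := by omega
  have htn : (i + (b.length : Int)).toNat = i.toNat + b.length := by omega
  have htn1 : (i + (b.length : Int) + 1).toNat = i.toNat + b.length + 1 := by omega
  unfold insertAt
  rw [PySem.List.slice_to w h0, PySem.List.slice_from w h0,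
      PySem.List.slice_to _ h0'', PySem.List.slice_from _ h0'',
      PySem.List.slice_toNat w h0 h0', PySem.List.slice_from w h0']
  rw [htn, htn1]
  have hlt : (w.take i.toNat).length = i.toNat := by simp; omega
  have e1 : w.take i.toNat ++ ['['] ++ w.drop i.toNat
      = w.take i.toNat ++ '[' :: w.drop i.toNat := by simp
  rw [e1]
  have e2 : (w.take i.toNat ++ '[' :: w.drop i.toNat).take (i.toNat + b.length + 1)
      = w.take i.toNat ++ '[' :: (w.drop i.toNat).take b.length := by
    rw [List.take_append, hlt]
    have : i.toNat + b.length + 1 - i.toNat = b.length + 1 := by omega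
    rw [this, List.take_succ_cons, List.take_of_length_le (by omega)]
  have e3 : (w.take i.toNat ++ '[' :: w.drop i.toNat).drop (i.toNat + b.length + 1)
      = w.drop (i.toNat + b.length) := by
    rw [List.drop_append, List.drop_eq_nil_of_le (by simp; omega), List.nil_append, hlt]
    have h4 : i.toNat + b.length + 1 - i.toNat = b.length + 1 := by omega
    rw [h4, List.drop_succ_cons, List.drop_drop]
  rw [e2, e3]
  have : i.toNat + b.length - i.toNat = b.length := by omega
  rw [this]
  simp [List.append_assoc]

theorem filter_eq (w : List Char) (parts : List String) :
    parts.filter (fun p => !(p == "") && PySem.Chars.isIn p.toList w) = parts.filter (selQ w) := rfl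

theorem body_eq (parts : List String) (word : String) (acc : List String)
    (hpre : "" ∈ parts → word = "") :
    (let st := parts.foldl (fun (st : List Char × Int) part =>
        let hm := hasMatch word.toList part.toList
        if hm.1 then
          if part.toList.length = st.1.length ∧ hm.2 < st.2 then (part.toList, hm.2)
          else if st.1.length < part.toList.length then (part.toList, hm.2)
          else st
        else st) (([] : List Char), (parts.length : Int))
     if 0 < st.1.length then
       acc ++ [String.ofList (insertAt (st.2 + (st.1.length : Int) + 1) (insertAt st.2 word.toList ['[']) [']'])]
     else acc ++ [word]) =
    (let w := word.toList
     let ms := (parts.filter (fun p => !(p == "") && PySem.Chars.isIn p.toList w)).map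
         (fun p => ((p.toList.length : Int), - PySem.Chars.find w p.toList))
     match PySem.List.max2? ms (·.1) (·.2) with
     | some (L, ni) =>
       acc ++ [String.ofList (PySem.List.slice w none (some (-ni)) ++ '[' ::
         (PySem.List.slice w (some (-ni)) (some (-ni + L)) ++ ']' ::
           PySem.List.slice w (some (-ni + L)) none))]
     | none => acc ++ [word]) := by
  have hA : parts.foldl (fun (st : List Char × Int) part =>
        let hm := hasMatch word.toList part.toList
        if hm.1 then
          if part.toList.length = st.1.length ∧ hm.2 < st.2 then (part.toList, hm.2)
          else if st.1.length < part.toList.length then (part.toList, hm.2)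
          else st
        else st) (([] : List Char), (parts.length : Int))
      = (parts.filter (selQ word.toList)).foldl (fSel word.toList) (([] : List Char), (parts.length : Int)) := by
    rw [← PySem.List.foldl_if_eq_foldl_filter (selQ word.toList) (fSel word.toList) parts]
    apply PySem.List.foldl_congr_mem
    intro st part hmem
    by_cases hemp : part = ""
    · subst hemp
      have hw : word.toList = [] := by rw [String.toList_eq_nil_iff]; exact hpre hmem
      have hpt : ("" : String).toList = [] := rfl
      simp only [hw, hpt, hasMatch_nil, selQ]
      rfl
    · have hptne : part.toList ≠ [] := fun h => hemp (String.toList_eq_nil_iff.mp h)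
      simp only [hasMatch_spec word.toList part.toList hptne]
      by_cases hin : PySem.Chars.isIn part.toList word.toList = true
      · rw [hin]
        have hsel : selQ word.toList part = true := by
          simp [selQ, hin, hemp]
        rw [if_pos hsel]
        simp only [if_true]
        rfl
      · rw [Bool.not_eq_true] at hin
        rw [hin]
        have hsel : selQ word.toList part = false := by
          simp [selQ, hin]
        rw [hsel]
        simp
  have hB : PySem.List.max2? ((parts.filter (selQ word.toList)).map (cand word.toList))
        (fun x => x.1) (fun x => x.2)
      = (parts.filter (selQ word.toList)).foldl (fun acc q => gMax acc (cand word.toList q)) none := by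
    unfold PySem.List.max2?
    rw [List.foldl_map]
    apply PySem.List.foldl_congr_mem
    intro a q _
    cases a with
    | none => rfl
    | some m => rfl
  have hinv := inv_fold word.toList ((parts.length : Int)) (parts.filter (selQ word.toList))
    (fun q hq => List.of_mem_filter hq)
    (([] : List Char), (parts.length : Int)) none (Or.inl ⟨rfl, rfl⟩)
  simp only [hA]
  simp only [filter_eq]
  show _ = (match PySem.List.max2? ((parts.filter (selQ word.toList)).map (cand word.toList))
        (fun x => x.1) (fun x => x.2) with
     | some (L, ni) =>
       acc ++ [String.ofList (PySem.List.slice word.toList none (some (-ni)) ++ '[' ::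
         (PySem.List.slice word.toList (some (-ni)) (some (-ni + L)) ++ ']' ::
           PySem.List.slice word.toList (some (-ni + L)) none))]
     | none => acc ++ [word])
  rw [hB]
  rcases hinv with ⟨hst, hacc⟩ | ⟨hlen, hinf, hfind, hacc⟩
  · rw [hst, hacc]
    simp
  · rw [hacc]
    set st := (parts.filter (selQ word.toList)).foldl (fSel word.toList)
      (([] : List Char), (parts.length : Int)) with hstdef
    rw [if_pos hlen]
    simp only [neg_neg]
    have hnn : 0 ≤ PySem.Chars.find word.toList st.1 := by
      rw [PySem.Chars.find_nonneg_iff]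
      exact hinf
    have hocc := (PySem.Chars.find_spec hnn).1
    have hlenle : (PySem.Chars.find word.toList st.1).toNat + st.1.length ≤ word.toList.length := by
      have h1 := hocc.length_le
      rw [List.length_drop] at h1
      have h2 : (PySem.Chars.find word.toList st.1) ≤ (word.toList.length : Int) :=
        PySem.Chars.find_le_length _ _
      omega
    congr 1
    rw [hfind]
    exact congrArg (fun t => [String.ofList t])
      (build_eq word.toList st.1 (PySem.Chars.find word.toList st.1) hnn hlenle)

theorem findSubstrings_eq (words parts : List String)
    (hpre : "" ∈ parts → ∀ w ∈ words, w = "") :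
    findSubstrings words parts = findSubstrings_alt words parts := by
  unfold findSubstrings findSubstrings_alt
  apply PySem.List.foldl_congr_mem
  intro acc word hw
  exact body_eq parts word acc (fun h => hpre h word hw)

-- ===== VERDICT (by name: the statement is the Claim_ definition above) =====
theorem findSubstrings_spec : Claim_equal_findSubstrings := by
  intro words parts _ hpre
  unfold Spec_findSubstrings
  exact findSubstrings_eq words parts hpre
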